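-- pv_equiv track=rewrite | github.com/erenculhaci/AI-Unit-Tests | Integration Tests/combined_modified_code.py | _pluck
-- ===== SOURCE A (Python) =====
-- from typing import List, Tuple, Union, Optional
--
-- def _pluck(arr: List[int]) -> List[int]:
--     """Find and return the smallest even value with its index."""
--     if not arr:
--         return []
--
--     smallest_even = float('inf')
--     smallest_index = -1
--
--     for i, num in enumerate(arr):
--         if num % 2 == 0 and num < smallest_even:
--             smallest_even = num
--             smallest_index = i
--
--     return [] if smallest_index == -1 else [smallest_even, smallest_index]
-- ===== SOURCE B (Python) =====
-- def _pluck(arr):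
--     """Find and return the smallest even value with its index."""
--     evens = [x for x in arr if x % 2 == 0]
--     if not evens:
--         return []
--     m = min(evens)
--     return [m, arr.index(m)]
-- ===== Notes on version B (the rewrite author's own statement) =====
-- stated objective: simpler
-- what changed: B is two staged passes: it first takes min() over the filtered even values alone (no index bookkeeping, no inf/-1 sentinels), then recovers the index with a separate arr.index(m) lookup, instead of A's single scan maintaining a running (best, index) pair.
import Mathlib
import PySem

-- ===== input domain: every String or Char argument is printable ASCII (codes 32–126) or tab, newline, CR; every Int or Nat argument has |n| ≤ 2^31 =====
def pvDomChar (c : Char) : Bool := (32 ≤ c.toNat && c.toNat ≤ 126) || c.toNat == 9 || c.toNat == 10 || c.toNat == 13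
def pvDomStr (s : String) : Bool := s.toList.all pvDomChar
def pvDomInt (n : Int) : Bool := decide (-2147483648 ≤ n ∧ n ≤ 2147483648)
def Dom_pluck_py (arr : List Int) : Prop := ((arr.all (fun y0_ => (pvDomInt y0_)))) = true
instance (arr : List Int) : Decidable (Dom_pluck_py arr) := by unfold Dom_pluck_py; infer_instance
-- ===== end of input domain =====

-- B replaces A's single running-(best,index) scan by two staged passes: min() over the even values alone, then a separate arr.index lookup; objective: simpler.

-- ===== PORT A =====
-- loop body of A: 'if num % 2 == 0 and num < smallest_even: …'; smallest_even = float('inf') is the 'none' state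
def pvStepA (s : Option Int × Int) (p : Int × Int) : Option Int × Int :=
  if PySem.Int.mod p.2 2 == 0 && (match s.1 with | none => true | some v => decide (p.2 < v)) then
    (some p.2, p.1)
  else s

def pluck_py (arr : List Int) : List Int :=
  if arr = [] then []
  else
    let st := (PySem.List.enumerate arr).foldl pvStepA ((none : Option Int), (-1 : Int))
    if st.2 == -1 then []
    else
      match st.1 with
      | none => []          -- unreachable: the index is ≠ -1 only after an update sets the value too
      | some v => [v, st.2]

-- ===== PORT B =====
-- 'evens = [x for x in arr if x % 2 == 0]'
def pvEvens (arr : List Int) : List Int := arr.filter (fun x => PySem.Int.mod x 2 == 0)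

def pluck_py_alt (arr : List Int) : List Int :=
  if pvEvens arr = [] then []
  else
    match PySem.List.min? (pvEvens arr) (fun y => y) with   -- min(evens)
    | none => []            -- unreachable: evens ≠ []
    | some m =>
      match PySem.List.index? arr m with                    -- arr.index(m)
      | none => []          -- unreachable: m ∈ evens ⊆ arr
      | some k => [m, (k : Int)]

-- ===== PRECONDITION & SPEC =====
def Spec_pluck_py (arr : List Int) (out : List Int) : Prop := out = pluck_py_alt arr
instance (arr : List Int) (out : List Int) : Decidable (Spec_pluck_py arr out) := by unfold Spec_pluck_py; infer_instance

-- ===== CLAIM (what is proved, stated in full; the proofs are below) =====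
def Claim_equal_pluck_py : Prop := ∀ (arr : List Int), Dom_pluck_py arr → Spec_pluck_py arr (pluck_py arr)

-- ===== LEMMAS AND PROOFS =====

-- the even (value, index) candidate pairs of arr, indices starting at n
def pvCands (arr : List Int) (n : Int) : List (Int × Int) :=
  ((PySem.List.enumerate arr n).filter (fun p => PySem.Int.mod p.2 2 == 0)).map (fun p => (p.2, p.1))

-- pure update step on candidate pairs (value, index): keep the strictly smaller value
def pvStepP (acc : Option (Int × Int)) (q : Int × Int) : Option (Int × Int) :=
  match acc with
  | none => some q
  | some m => if q.1 < m.1 then some q else acc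

def pvEnc (acc : Option (Int × Int)) : Option Int × Int :=
  match acc with
  | none => ((none : Option Int), (-1 : Int))
  | some m => (some m.1, m.2)

theorem pv_cands_cons_even (x : Int) (t : List Int) (n : Int) (he : (PySem.Int.mod x 2 == 0) = true) :
    pvCands (x :: t) n = (x, n) :: pvCands t (n + 1) := by
  unfold pvCands
  rw [PySem.List.enumerate_cons, List.filter_cons]
  simp only [he, if_true, List.map_cons]

theorem pv_cands_cons_odd (x : Int) (t : List Int) (n : Int) (he : (PySem.Int.mod x 2 == 0) = false) :
    pvCands (x :: t) n = pvCands t (n + 1) := by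
  unfold pvCands
  rw [PySem.List.enumerate_cons, List.filter_cons]
  simp only [he, Bool.false_eq_true, if_false]

theorem pv_foldA (l : List (Int × Int)) (acc : Option (Int × Int)) :
    l.foldl pvStepA (pvEnc acc)
      = pvEnc (((l.filter (fun p => PySem.Int.mod p.2 2 == 0)).map (fun p => (p.2, p.1))).foldl pvStepP acc) := by
  induction l generalizing acc with
  | nil => rfl
  | cons p t ih =>
    rw [List.foldl_cons, List.filter_cons]
    by_cases he : (PySem.Int.mod p.2 2 == 0) = true
    · have hstep : pvStepA (pvEnc acc) p = pvEnc (pvStepP acc (p.2, p.1)) := by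
        cases acc with
        | none =>
          unfold pvStepA pvStepP pvEnc
          rw [he]
          rfl
        | some m =>
          unfold pvStepA pvStepP pvEnc
          rw [he]
          by_cases hlt : p.2 < m.1 <;> simp [hlt]
      rw [he, if_pos rfl, List.map_cons, List.foldl_cons, hstep]
      exact ih (pvStepP acc (p.2, p.1))
    · have he' : (PySem.Int.mod p.2 2 == 0) = false := by
        exact Bool.not_eq_true _ ▸ (eq_false_of_ne_true he)
      have hstep : pvStepA (pvEnc acc) p = pvEnc acc := by
        cases acc <;> (unfold pvStepA; rw [he']; rfl)
      rw [he', if_neg Bool.false_ne_true, hstep]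
      exact ih acc

-- the first minimal pair, cons-recursively
def pvFirstMin : List (Int × Int) → Option (Int × Int)
  | [] => none
  | q :: t =>
    match pvFirstMin t with
    | none => some q
    | some m => if m.1 < q.1 then some m else some q

def pvMerge (a b : Option (Int × Int)) : Option (Int × Int) :=
  match a, b with
  | none, r => r
  | some a, none => some a
  | some a, some m => if m.1 < a.1 then some m else some a

theorem pv_foldP_merge (l : List (Int × Int)) (acc : Option (Int × Int)) :
    l.foldl pvStepP acc = pvMerge acc (pvFirstMin l) := by
  induction l generalizing acc with
  | nil => cases acc <;> rfl
  | cons q t ih =>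
    have hstep : pvStepP acc q = pvMerge acc (some q) := by
      cases acc with
      | none => rfl
      | some m => rfl
    have hassoc : pvMerge (pvMerge acc (some q)) (pvFirstMin t)
        = pvMerge acc (pvMerge (some q) (pvFirstMin t)) := by
      cases acc with
      | none => rfl
      | some a =>
        cases hr : pvFirstMin t with
        | none =>
          by_cases hqa : q.1 < a.1 <;> simp [pvMerge, hqa]
        | some m =>
          by_cases hqa : q.1 < a.1 <;> by_cases hmq : m.1 < q.1 <;> by_cases hma : m.1 < a.1 <;>
            simp [pvMerge, hqa, hmq, hma] <;> omega
    have hfm : pvFirstMin (q :: t) = pvMerge (some q) (pvFirstMin t) := by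
      simp only [pvFirstMin]
      cases hr : pvFirstMin t with
      | none => rfl
      | some m => rfl
    rw [List.foldl_cons, hstep, ih, hassoc, hfm]

-- Python min keeps the FIRST minimum: min? over a cons
def pvMinAcc (o : Option Int) (a : Int) : Int :=
  match o with
  | none => a
  | some m => if m < a then m else a

theorem pv_min_cons (x : Int) (l : List Int) :
    PySem.List.min? (x :: l) (fun y => y) = some (pvMinAcc (PySem.List.min? l (fun y => y)) x) := by
  induction l generalizing x with
  | nil => rfl
  | cons b t ih =>
    have hcons : PySem.List.min? (x :: b :: t) (fun y => y)
        = if b < x then PySem.List.min? (b :: t) (fun y => y)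
          else PySem.List.min? (x :: t) (fun y => y) := by
      by_cases h : b < x <;> simp [PySem.List.min?, List.foldl_cons, h]
    rw [hcons]
    by_cases hba : b < x
    · rw [if_pos hba, ih b]
      cases hm : PySem.List.min? t (fun y => y) with
      | none => simp only [pvMinAcc, Option.some.injEq]; split_ifs; omega
      | some m => simp only [pvMinAcc, Option.some.injEq]; split_ifs <;> omega
    · rw [if_neg hba, ih x, ih b]
      cases hm : PySem.List.min? t (fun y => y) with
      | none => simp only [pvMinAcc, Option.some.injEq]; split_ifs; omega
      | some m => simp only [pvMinAcc, Option.some.injEq]; split_ifs <;> omega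

-- main invariant: pvFirstMin of the candidates gives B's min value and B's first index (offset by n)
theorem pv_main (arr : List Int) (n : Int) :
    (pvEvens arr = [] ∧ pvFirstMin (pvCands arr n) = none)
    ∨ ∃ m : Int, ∃ k : Nat,
        pvFirstMin (pvCands arr n) = some (m, n + (k : Int))
        ∧ PySem.List.min? (pvEvens arr) (fun y => y) = some m
        ∧ PySem.List.index? arr m = some k := by
  induction arr generalizing n with
  | nil => exact Or.inl ⟨rfl, rfl⟩
  | cons x t ih =>
    by_cases he : (PySem.Int.mod x 2 == 0) = true
    · have hc := pv_cands_cons_even x t n he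
      have hf : pvEvens (x :: t) = x :: pvEvens t := by
        unfold pvEvens
        rw [List.filter_cons]
        simp only [he, if_true]
      rcases ih (n + 1) with ⟨h1, h2⟩ | ⟨m, k, h1, h2, h3⟩
      · refine Or.inr ⟨x, 0, ?_, ?_, ?_⟩
        · rw [hc]
          simp only [pvFirstMin, h2, Nat.cast_zero, add_zero]
        · rw [hf, pv_min_cons, h1]
          rfl
        · exact PySem.List.index?_cons_self x t
      · by_cases hlt : m < x
        · refine Or.inr ⟨m, k + 1, ?_, ?_, ?_⟩
          · rw [hc]
            simp only [pvFirstMin, h1, hlt, if_pos, Option.some.injEq, Prod.mk.injEq, true_and]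
            push_cast
            ring
          · rw [hf, pv_min_cons, h2]
            simp only [pvMinAcc, hlt, if_pos]
          · have hne : x ≠ m := by omega
            rw [PySem.List.index?_cons_of_ne t hne, h3]
            rfl
        · refine Or.inr ⟨x, 0, ?_, ?_, ?_⟩
          · rw [hc]
            simp [pvFirstMin, h1, hlt]
          · rw [hf, pv_min_cons, h2]
            simp [pvMinAcc, hlt]
          · exact PySem.List.index?_cons_self x t
    · have he' : (PySem.Int.mod x 2 == 0) = false := by
        exact Bool.not_eq_true _ ▸ (eq_false_of_ne_true he)
      have hc := pv_cands_cons_odd x t n he'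
      have hf : pvEvens (x :: t) = pvEvens t := by
        unfold pvEvens
        rw [List.filter_cons]
        simp only [he', Bool.false_eq_true, if_false]
      rcases ih (n + 1) with ⟨h1, h2⟩ | ⟨m, k, h1, h2, h3⟩
      · exact Or.inl ⟨by rw [hf, h1], by rw [hc, h2]⟩
      · refine Or.inr ⟨m, k + 1, ?_, ?_, ?_⟩
        · rw [hc, h1]
          simp only [Option.some.injEq, Prod.mk.injEq, true_and]
          push_cast
          ring
        · rw [hf, h2]
        · have hm : m ∈ pvEvens t := PySem.List.min?_mem h2
          have hmev : (PySem.Int.mod m 2 == 0) = true := (List.mem_filter.mp hm).2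
          have hne : x ≠ m := by
            intro h
            rw [h, hmev] at he'
            exact Bool.true_eq_false ▸ he'
          rw [PySem.List.index?_cons_of_ne t hne, h3]
          rfl

-- ===== VERDICT (by name: the statement is the Claim_ definition above) =====
theorem pluck_py_spec : Claim_equal_pluck_py := by
  intro arr _
  unfold Spec_pluck_py pluck_py pluck_py_alt
  by_cases harr : arr = []
  · subst harr; rfl
  · rw [if_neg harr]
    have h2 : (pvCands arr 0).foldl pvStepP none = pvFirstMin (pvCands arr 0) :=
      pv_foldP_merge (pvCands arr 0) none
    have hA : (PySem.List.enumerate arr).foldl pvStepA ((none : Option Int), (-1 : Int))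
        = pvEnc (pvFirstMin (pvCands arr 0)) :=
      (pv_foldA (PySem.List.enumerate arr) none).trans (congrArg pvEnc h2)
    rw [hA]
    rcases pv_main arr 0 with ⟨h1, hfm⟩ | ⟨m, k, hfm, hmin, hidx⟩
    · rw [hfm, if_pos h1]
      rfl
    · have hne : ¬ (pvEvens arr = []) := by
        intro h
        rw [(PySem.List.min?_eq_none_iff (pvEvens arr) (fun y => y)).mpr h] at hmin
        cases hmin
      rw [hfm, if_neg hne, hmin]
      have hk : ¬ ((((k : Int)) == (-1 : Int)) = true) := by
        simp only [beq_iff_eq]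
        omega
      simp only [pvEnc, zero_add, hidx]
      rw [if_neg hk]
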